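-- pv_equiv track=rewrite | github.com/yauheniyadrozd/route-optimization-system | solver.py | _split_routes
-- ===== SOURCE A (Python) =====
-- def _split_routes(giant_tour, depot_idx):
--     """Split giant tour into vehicle routes"""
--     routes = []
--     current_route = [depot_idx]
--
--     for node in giant_tour[1:-1]:  # Skip depot at start/end
--         current_route.append(node)
--         # Simple splitting logic - can be enhanced
--         if len(current_route) >= 5:  # Max 4 clients per route
--             current_route.append(depot_idx)
--             routes.append(current_route)
--             current_route = [depot_idx]
--
--     # Add last route if not empty
--     if len(current_route) > 1:
--         current_route.append(depot_idx)
--         routes.append(current_route)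
--
--     return routes
-- ===== SOURCE B (Python) =====
-- def _split_routes(giant_tour, depot_idx):
--     """Split giant tour into vehicle routes (fixed-stride chunking)."""
--     middle = list(giant_tour[1:-1])
--     return [[depot_idx] + middle[i:i + 4] + [depot_idx]
--             for i in range(0, len(middle), 4)]
-- ===== Notes on version B (the rewrite author's own statement) =====
-- stated objective: simpler
-- what changed: Replaces A's element-by-element accumulator loop with flush-on-length-5 by direct fixed-stride slicing of the interior into chunks of 4 clients via a single comprehension.
import Mathlib
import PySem

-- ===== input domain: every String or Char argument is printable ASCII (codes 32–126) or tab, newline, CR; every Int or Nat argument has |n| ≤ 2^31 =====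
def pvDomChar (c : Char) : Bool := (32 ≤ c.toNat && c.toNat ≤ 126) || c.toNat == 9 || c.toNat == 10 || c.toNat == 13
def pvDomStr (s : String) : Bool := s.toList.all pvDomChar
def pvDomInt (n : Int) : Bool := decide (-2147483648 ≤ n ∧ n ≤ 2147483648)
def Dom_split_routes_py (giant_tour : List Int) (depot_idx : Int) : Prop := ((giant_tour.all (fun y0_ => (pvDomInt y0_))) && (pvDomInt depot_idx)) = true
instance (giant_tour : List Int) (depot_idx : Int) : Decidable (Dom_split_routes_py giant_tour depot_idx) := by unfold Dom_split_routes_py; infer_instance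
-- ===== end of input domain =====

-- B replaces A's per-node accumulator loop (flush when the route reaches length 5)
-- by fixed-stride slicing of the interior into chunks of 4 clients; same cost, simpler.


-- ===== PORT A =====
def split_routes_py (giant_tour : List Int) (depot_idx : Int) : List (List Int) :=
  let middle := PySem.List.slice giant_tour (some 1) (some (-1))
  let s := middle.foldl
    (fun (st : List (List Int) × List Int) node =>
      let cur := st.2 ++ [node]
      if 5 ≤ cur.length then (st.1 ++ [cur ++ [depot_idx]], [depot_idx])
      else (st.1, cur))
    ([], [depot_idx])
  if 1 < s.2.length then s.1 ++ [s.2 ++ [depot_idx]] else s.1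

-- ===== PORT B =====
def split_routes_py_alt (giant_tour : List Int) (depot_idx : Int) : List (List Int) :=
  let middle := PySem.List.slice giant_tour (some 1) (some (-1))
  (PySem.List.pyRange 0 (middle.length : Int) 4).map
    (fun i => [depot_idx] ++ PySem.List.slice middle (some i) (some (i + 4)) ++ [depot_idx])

-- ===== PRECONDITION & SPEC =====
def Spec_split_routes_py (giant_tour : List Int) (depot_idx : Int) (out : List (List Int)) : Prop := out = split_routes_py_alt giant_tour depot_idx
instance (giant_tour : List Int) (depot_idx : Int) (out : List (List Int)) : Decidable (Spec_split_routes_py giant_tour depot_idx out) := by unfold Spec_split_routes_py; infer_instance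

-- ===== CLAIM (what is proved, stated in full; the proofs are below) =====
def Claim_equal_split_routes_py : Prop := ∀ (giant_tour : List Int) (depot_idx : Int), Dom_split_routes_py giant_tour depot_idx → Spec_split_routes_py giant_tour depot_idx (split_routes_py giant_tour depot_idx)

-- ===== LEMMAS AND PROOFS =====

/-- Reference chunking: groups of 4 clients, each wrapped in the depot. -/
def chunks (d : Int) (xs : List Int) : List (List Int) :=
  if _h : xs = [] then []
  else ([d] ++ xs.take 4 ++ [d]) :: chunks d (xs.drop 4)
termination_by xs.length
decreasing_by
  cases xs with
  | nil => exact absurd rfl _h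
  | cons a t => simp [List.length_drop]

theorem chunks_nil (d : Int) : chunks d [] = [] := by simp [chunks]

theorem chunks_cons (d : Int) (xs : List Int) (h : xs ≠ []) :
    chunks d xs = ([d] ++ xs.take 4 ++ [d]) :: chunks d (xs.drop 4) := by
  rw [chunks]; simp [h]

/-- A's fold with a partially filled current route (depot plus `pre`, `pre.length ≤ 3`)
    finishes to `acc ++ chunks d (pre ++ ms)`. -/
theorem foldA_eq_chunks (d : Int) :
    ∀ (ms : List Int) (acc : List (List Int)) (pre : List Int), pre.length ≤ 3 →
      (let s := ms.foldl
        (fun (st : List (List Int) × List Int) node =>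
          let cur := st.2 ++ [node]
          if 5 ≤ cur.length then (st.1 ++ [cur ++ [d]], [d])
          else (st.1, cur))
        (acc, d :: pre)
      if 1 < s.2.length then s.1 ++ [s.2 ++ [d]] else s.1) = acc ++ chunks d (pre ++ ms) := by
  intro ms
  induction ms with
  | nil =>
    intro acc pre hpre
    simp only [List.append_nil]
    cases pre with
    | nil => simp [chunks_nil]
    | cons p ps =>
      have hne : p :: ps ≠ [] := by simp
      rw [chunks_cons d _ hne]
      have h4 : (p :: ps).length ≤ 4 := le_trans hpre (by norm_num)
      rw [List.take_of_length_le h4, List.drop_of_length_le h4, chunks_nil]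
      simp
  | cons node ms' ih =>
    intro acc pre hpre
    by_cases h3 : pre.length = 3
    · simp only [List.foldl_cons]
      have hcond : 5 ≤ ((d :: pre) ++ [node]).length := by simp [h3]
      simp only [if_pos hcond]
      rw [ih (acc ++ [(d :: pre) ++ [node] ++ [d]]) [] (by simp)]
      have hne : pre ++ node :: ms' ≠ [] := by simp
      rw [chunks_cons d _ hne]
      have htk : (pre ++ node :: ms').take 4 = pre ++ [node] := by
        rw [List.take_append, List.take_of_length_le (by omega)]
        have : 4 - pre.length = 1 := by omega
        simp [this]
      have hdr : (pre ++ node :: ms').drop 4 = ms' := by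
        rw [List.drop_append, List.drop_of_length_le (by omega)]
        have : 4 - pre.length = 1 := by omega
        simp [this]
      rw [htk, hdr]
      simp
    · simp only [List.foldl_cons]
      have hcond : ¬ 5 ≤ ((d :: pre) ++ [node]).length := by simp; omega
      simp only [if_neg hcond]
      have hc : d :: pre ++ [node] = d :: (pre ++ [node]) := by simp
      rw [hc, ih acc (pre ++ [node]) (by simp; omega)]
      simp

/-- The natural-index form of B's strided chunking equals the reference chunking. -/
theorem mapB_nat_eq_chunks (d : Int) :
    ∀ (fuel : Nat) (xs : List Int), xs.length ≤ fuel →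
      (List.range ((xs.length + 3) / 4)).map
        (fun k => [d] ++ (xs.drop (4 * k)).take 4 ++ [d]) = chunks d xs := by
  intro fuel
  induction fuel with
  | zero =>
    intro xs hxs
    have hx : xs = [] := List.eq_nil_of_length_eq_zero (by omega)
    subst hx; simp [chunks_nil]
  | succ n ih =>
    intro xs hxs
    by_cases hxe : xs = []
    · subst hxe; simp [chunks_nil]
    · have hlen : 1 ≤ xs.length := by
        cases xs with
        | nil => exact absurd rfl hxe
        | cons a t => simp
      have hsucc : (xs.length + 3) / 4 = ((xs.drop 4).length + 3) / 4 + 1 := by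
        simp only [List.length_drop]; omega
      rw [hsucc, List.range_succ_eq_map, List.map_cons, List.map_map]
      have htail : ((fun k => [d] ++ (xs.drop (4 * k)).take 4 ++ [d]) ∘ Nat.succ)
          = (fun k => [d] ++ ((xs.drop 4).drop (4 * k)).take 4 ++ [d]) := by
        funext k
        simp only [Function.comp, List.drop_drop]
        have : 4 * Nat.succ k = 4 + 4 * k := by omega
        rw [this]
      rw [htail, ih (xs.drop 4) (by simp [List.length_drop]; omega)]
      simpa using (chunks_cons d xs hxe).symm

/-- B's pyRange/slice map equals the reference chunking. -/
theorem mapB_eq_chunks (d : Int) (xs : List Int) :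
    (PySem.List.pyRange 0 (xs.length : Int) 4).map
      (fun i => [d] ++ PySem.List.slice xs (some i) (some (i + 4)) ++ [d]) = chunks d xs := by
  by_cases hxe : xs = []
  · subst hxe; simp [PySem.List.pyRange, chunks_nil]
  · have hlen : 1 ≤ xs.length := by
      cases xs with
      | nil => exact absurd rfl hxe
      | cons a t => simp
    rw [PySem.List.pyRange_of_pos _ _ (by norm_num : (0:Int) < 4)]
    rw [if_pos (by exact_mod_cast hlen : (0:Int) < (xs.length : Int))]
    have hcnt : (((xs.length : Int) - 0 + 4 - 1) / 4).toNat = (xs.length + 3) / 4 := by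
      have h1 : ((xs.length : Int) - 0 + 4 - 1) = ((xs.length + 3 : Nat) : Int) := by
        push_cast; ring
      rw [h1, show ((4:Int) = ((4:Nat):Int)) by norm_num, ← Int.natCast_div, Int.toNat_natCast]
    rw [hcnt, List.map_map]
    rw [← mapB_nat_eq_chunks d xs.length xs le_rfl]
    apply List.map_congr_left
    intro k _
    simp only [Function.comp]
    have h1 : (0:Int) + 4 * (k:Int) = ((4 * k : Nat) : Int) := by push_cast; ring
    have h2 : ((4 * k : Nat) : Int) + 4 = ((4 * k : Nat) : Int) + ((4:Nat) : Int) := by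
      norm_num
    rw [h1, h2, PySem.List.slice_natCast_add]

theorem portA_eq_chunks (gt : List Int) (d : Int) :
    split_routes_py gt d = chunks d (PySem.List.slice gt (some 1) (some (-1))) := by
  unfold split_routes_py
  exact foldA_eq_chunks d (PySem.List.slice gt (some 1) (some (-1))) [] [] (by simp)

theorem portB_eq_chunks (gt : List Int) (d : Int) :
    split_routes_py_alt gt d = chunks d (PySem.List.slice gt (some 1) (some (-1))) := by
  unfold split_routes_py_alt
  exact mapB_eq_chunks d (PySem.List.slice gt (some 1) (some (-1)))

-- ===== VERDICT (by name: the statement is the Claim_ definition above) =====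
theorem split_routes_py_spec : Claim_equal_split_routes_py := by
  intro gt d _
  unfold Spec_split_routes_py
  rw [portA_eq_chunks, portB_eq_chunks]
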